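-- pv_equiv track=rewrite | github.com/aayushkrm/Code-Gym-2025-Q-A | Answer/taskG.py | solve
-- ===== SOURCE A (Python) =====
-- def solve(petya, vlad, vadim, vasya):
--     max_kachistost = 0
--
--     # We need to check all possible values for Artem
--     # For each possible value, compute the kachistost
--
--     # To maximize kachistost, we'll try specific values that could satisfy each condition
--     possible_artem_values = set()
--
--     # Case 1: a[228] + a[229] = a[230] => petya + vlad = artem
--     possible_artem_values.add(petya + vlad)
--
--     # Case 2: a[229] + a[230] = a[231] => vlad + artem = vadim => artem = vadim - vlad
--     if vadim - vlad > 0: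
--         possible_artem_values.add(vadim - vlad)
--
--     # Case 3: a[230] + a[231] = a[232] => artem + vadim = vasya => artem = vasya - vadim
--     if vasya - vadim > 0:
--         possible_artem_values.add(vasya - vadim)
--
--     # Also try values that allow two equations to be satisfied simultaneously
--     # For example, if we want conditions 1 and 2 to be satisfied:
--     # petya + vlad = artem and vlad + artem = vadim
--     # This would mean artem = petya + vlad and artem = vadim - vlad
--     # So petya + vlad = vadim - vlad => 2*vlad + petya = vadim
--
--     # For conditions 2 and 3:
--     # vlad + artem = vadim and artem + vadim = vasya
--     # This means artem = vadim - vlad and artem = vasya - vadim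
--     # So vadim - vlad = vasya - vadim => 2*vadim = vasya + vlad
--
--     # For conditions 1 and 3:
--     # petya + vlad = artem and artem + vadim = vasya
--     # This means artem = petya + vlad and artem = vasya - vadim
--     # So petya + vlad = vasya - vadim => petya + vlad + vadim = vasya
--
--     # Check each possible value
--     for artem in possible_artem_values:
--         if artem <= 0:  # Skip if Artem's result is not positive
--             continue
--
--         kachistost = 0
--
--         # Check condition 1: petya + vlad = artem
--         if petya + vlad == artem:
--             kachistost += 1
--
--         # Check condition 2: vlad + artem = vadim
--         if vlad + artem == vadim:
--             kachistost += 1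
--
--         # Check condition 3: artem + vadim = vasya
--         if artem + vadim == vasya:
--             kachistost += 1
--
--         max_kachistost = max(max_kachistost, kachistost)
--
--     return max_kachistost
-- ===== SOURCE B (Python) =====
-- def solve(petya, vlad, vadim, vasya):
--     # Closed-form case analysis: the three conditions are satisfied exactly when
--     # Artem equals t1, t2, t3 respectively, so the best score is 3, 2, 1 or 0
--     # depending on which equalities hold among the positive targets.
--     t1 = petya + vlad
--     t2 = vadim - vlad
--     t3 = vasya - vadim
--     if t1 == t2 == t3 and t1 > 0:
--         return 3
--     if (t1 == t2 and t1 > 0) or (t2 == t3 and t2 > 0) or (t1 == t3 and t1 > 0):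
--         return 2
--     if t1 > 0 or t2 > 0 or t3 > 0:
--         return 1
--     return 0
-- ===== Notes on version B (the rewrite author's own statement) =====
-- stated objective: simpler
-- what changed: Replaces candidate-set generation and the per-candidate recount loop with a loop-free closed-form case analysis: the answer is 3/2/1/0 decided directly by which equalities hold among the positive targets petya+vlad, vadim-vlad, vasya-vadim.
import Mathlib
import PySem

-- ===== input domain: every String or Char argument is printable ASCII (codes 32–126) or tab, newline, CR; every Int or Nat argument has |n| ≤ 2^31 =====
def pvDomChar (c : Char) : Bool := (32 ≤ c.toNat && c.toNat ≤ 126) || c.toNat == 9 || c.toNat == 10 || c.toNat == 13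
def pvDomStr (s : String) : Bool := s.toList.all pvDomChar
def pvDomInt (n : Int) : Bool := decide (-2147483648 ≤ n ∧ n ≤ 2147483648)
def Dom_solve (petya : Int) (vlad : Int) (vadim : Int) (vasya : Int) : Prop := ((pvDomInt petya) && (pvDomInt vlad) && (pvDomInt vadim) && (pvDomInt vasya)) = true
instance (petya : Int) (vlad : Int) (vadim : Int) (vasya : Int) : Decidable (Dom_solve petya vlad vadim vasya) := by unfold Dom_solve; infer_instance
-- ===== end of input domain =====

-- B replaces A's candidate-set generation and per-candidate recount loop with a loop-free
-- closed-form case analysis over the equalities among the positive targets (objective: simpler).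
-- ===== PORT A =====
-- Port of A: build the candidate set, then for each positive candidate recount the three conditions.
def solve (petya : Int) (vlad : Int) (vadim : Int) (vasya : Int) : Int :=
  let pav : PySem.Set Int := PySem.Set.add PySem.Set.empty (petya + vlad)
  let pav := if vadim - vlad > 0 then PySem.Set.add pav (vadim - vlad) else pav
  let pav := if vasya - vadim > 0 then PySem.Set.add pav (vasya - vadim) else pav
  pav.foldl (fun maxK artem =>
    if artem ≤ 0 then maxK
    else
      let k : Int := 0
      let k := if petya + vlad == artem then k + 1 else k
      let k := if vlad + artem == vadim then k + 1 else k
      let k := if artem + vadim == vasya then k + 1 else k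
      max maxK k) 0

-- ===== PORT B =====
-- Port of B: loop-free early-return chain on the equalities among the positive targets.
def solve_alt (petya : Int) (vlad : Int) (vadim : Int) (vasya : Int) : Int :=
  let t1 := petya + vlad
  let t2 := vadim - vlad
  let t3 := vasya - vadim
  if t1 = t2 ∧ t2 = t3 ∧ t1 > 0 then 3
  else if (t1 = t2 ∧ t1 > 0) ∨ (t2 = t3 ∧ t2 > 0) ∨ (t1 = t3 ∧ t1 > 0) then 2
  else if t1 > 0 ∨ t2 > 0 ∨ t3 > 0 then 1
  else 0

-- ===== PRECONDITION & SPEC =====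
def Spec_solve (petya : Int) (vlad : Int) (vadim : Int) (vasya : Int) (out : Int) : Prop := out = solve_alt petya vlad vadim vasya
instance (petya : Int) (vlad : Int) (vadim : Int) (vasya : Int) (out : Int) : Decidable (Spec_solve petya vlad vadim vasya out) := by unfold Spec_solve; infer_instance

-- ===== CLAIM (what is proved, stated in full; the proofs are below) =====
def Claim_equal_solve : Prop := ∀ (petya : Int) (vlad : Int) (vadim : Int) (vasya : Int), Dom_solve petya vlad vadim vasya → Spec_solve petya vlad vadim vasya (solve petya vlad vadim vasya)

-- ===== LEMMAS AND PROOFS =====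

-- ===== VERDICT (by name: the statement is the Claim_ definition above) =====
set_option maxHeartbeats 2000000 in
theorem solve_spec : Claim_equal_solve := by
  intro p v w y _
  unfold Spec_solve solve solve_alt
  simp only [PySem.Set.add, PySem.Set.empty, PySem.Set.contains]
  by_cases h1 : 0 < p + v <;> by_cases h2 : 0 < w - v <;> by_cases h3 : 0 < y - w <;>
    simp only [h1, h2, h3, if_true, if_false, List.elem_nil] <;>
  by_cases e12 : w - v = p + v <;> by_cases e13 : y - w = p + v <;> by_cases e23 : y - w = w - v <;>
    simp [e12, e13, e23, List.foldl] <;>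
  split_ifs <;> omega
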